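-- pv_equiv track=rewrite | github.com/R2D2EV/Code-Problems | CodeSignalPath/StringZigZag/stringZigzag2.py | solution2
-- ===== SOURCE A (Python) =====
-- def solution2(inputString):
--     result = ''
--     length = len(inputString)
--     for i in range(length // 2 + length % 2):
--         # a b c d e f g  0  1  2  3
--         result += inputString[- i - 1]
--
--     for i in range(length // 2):
--         # a b c d e f g  0  1  2  3
--         result += inputString[i]
--
--     return result
--
-- inputString = "abcdefg"
-- ===== SOURCE B (Python) =====
-- def solution2(inputString):
--     k = len(inputString) // 2
--     return inputString[k:][::-1] + inputString[:k]
-- ===== Notes on version B (the rewrite author's own statement) =====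
-- stated objective: simpler
-- what changed: Replaces the two index-by-index appending loops (with negative indexing) by a closed-form expression: slice off the back half, reverse it with a slice step of -1, and concatenate the front-half slice.
import Mathlib
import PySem

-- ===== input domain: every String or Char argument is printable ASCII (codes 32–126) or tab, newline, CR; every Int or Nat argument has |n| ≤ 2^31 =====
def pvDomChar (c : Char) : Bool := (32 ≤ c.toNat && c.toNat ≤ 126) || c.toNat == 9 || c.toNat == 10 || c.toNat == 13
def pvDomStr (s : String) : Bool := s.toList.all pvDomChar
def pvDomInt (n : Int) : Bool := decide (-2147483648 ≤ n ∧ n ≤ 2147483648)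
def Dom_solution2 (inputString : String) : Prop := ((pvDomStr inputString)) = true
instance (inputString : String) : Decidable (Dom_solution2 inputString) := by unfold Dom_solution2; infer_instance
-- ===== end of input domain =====

-- B replaces A's two index-by-index appending loops by slicing: reversed back-half slice ++ front-half slice (simpler, closed form).


-- ===== PORT A =====
-- literal port: result starts empty; first loop appends inputString[-i-1] for i in range(len//2 + len%2),
-- second loop appends inputString[i] for i in range(len//2) (pyGet? is never none here; the none branch keeps acc)
def solution2 (inputString : String) : String :=
  let length : Int := PySem.Str.len inputString
  let r1 : List Char :=
    (PySem.List.pyRange 0 (PySem.Int.floordiv length 2 + PySem.Int.mod length 2) 1).foldl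
      (fun acc i =>
        match PySem.Str.pyGet? inputString (-i - 1) with
        | some c => acc ++ [c]
        | none => acc) []
  let r2 : List Char :=
    (PySem.List.pyRange 0 (PySem.Int.floordiv length 2) 1).foldl
      (fun acc i =>
        match PySem.Str.pyGet? inputString i with
        | some c => acc ++ [c]
        | none => acc) r1
  String.ofList r2

-- ===== PORT B =====
-- literal port of Source B: k = len // 2; inputString[k:][::-1] + inputString[:k]
def solution2_alt (inputString : String) : String :=
  let l := inputString.toList
  let k : Int := PySem.Int.floordiv (PySem.Str.len inputString) 2
  let back := PySem.List.slice l (some k) none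
  let front := PySem.List.slice l none (some k)
  String.ofList (((PySem.List.slice? back none none (-1)).getD []) ++ front)

-- ===== PRECONDITION & SPEC =====
def Spec_solution2 (inputString : String) (out : String) : Prop := out = solution2_alt inputString
instance (inputString : String) (out : String) : Decidable (Spec_solution2 inputString out) := by unfold Spec_solution2; infer_instance

-- ===== CLAIM (what is proved, stated in full; the proofs are below) =====
def Claim_equal_solution2 : Prop := ∀ (inputString : String), Dom_solution2 inputString → Spec_solution2 inputString (solution2 inputString)

-- ===== LEMMAS AND PROOFS =====

-- the match in A's loop body is just appending the option's contents
theorem pvMatchBody (s : String) (f : Int → Int) :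
    (fun (acc : List Char) (i : Int) =>
      match PySem.Str.pyGet? s (f i) with
      | some c => acc ++ [c]
      | none => acc)
    = (fun acc i => acc ++ (PySem.Str.pyGet? s (f i)).toList) := by
  funext acc i
  cases PySem.Str.pyGet? s (f i) <;> simp

-- A's first loop, as a flatMap over range: the last c characters in reverse
theorem pvLoop1 (s : String) (c : Nat) (h : c ≤ s.toList.length) :
    (List.range c).flatMap (fun (j : Nat) => (PySem.Str.pyGet? s (-(j : Int) - 1)).toList)
      = (s.toList.drop (s.toList.length - c)).reverse := by
  induction c with
  | zero => simp
  | succ c ih =>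
    rw [List.range_succ, List.flatMap_append, ih (by omega)]
    have hcast : (-(c : Int) - 1) = -(((c + 1 : Nat) : Int)) := by push_cast; ring
    have hget : PySem.Str.pyGet? s (-(c : Int) - 1)
        = s.toList[s.toList.length - (c + 1)]? := by
      rw [hcast]
      simp only [PySem.Str.pyGet?_eq, PySem.Chars.pyGet?_eq_listPyGet?]
      exact PySem.List.pyGet?_neg_natCast s.toList (c + 1) (by omega) h
    have hlt : s.toList.length - (c + 1) < s.toList.length := by omega
    simp only [List.flatMap_cons, List.flatMap_nil, List.append_nil]
    rw [hget, List.getElem?_eq_getElem hlt]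
    have hdrop : s.toList.drop (s.toList.length - (c + 1))
        = s.toList[s.toList.length - (c + 1)] :: s.toList.drop (s.toList.length - c) := by
      rw [show s.toList.length - c = (s.toList.length - (c + 1)) + 1 by omega]
      exact (List.getElem_cons_drop hlt).symm
    rw [hdrop, List.reverse_cons]
    rfl
  -- note: the flatMap body at index c contributes exactly one character

-- A's second loop, as a flatMap over range: the first c characters
theorem pvLoop2 (s : String) (c : Nat) :
    (List.range c).flatMap (fun (j : Nat) => (PySem.Str.pyGet? s ((j : Int))).toList)
      = s.toList.take c := by
  induction c with
  | zero => simp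
  | succ c ih =>
    rw [List.range_succ, List.flatMap_append, ih, List.take_add_one]
    simp

theorem solution2_eq_alt (s : String) : solution2 s = solution2_alt s := by
  unfold solution2 solution2_alt
  simp only [PySem.Str.len_eq]
  have hfd : PySem.Int.floordiv (s.toList.length : Int) 2 = ((s.toList.length / 2 : Nat) : Int) := by
    exact_mod_cast PySem.Int.floordiv_natCast s.toList.length 2
  have hmd : PySem.Int.mod (s.toList.length : Int) 2 = ((s.toList.length % 2 : Nat) : Int) := by
    exact_mod_cast PySem.Int.mod_natCast s.toList.length 2
  rw [hfd, hmd]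
  have hceil : ((s.toList.length / 2 : Nat) : Int) + ((s.toList.length % 2 : Nat) : Int)
      = (((s.toList.length / 2 + s.toList.length % 2 : Nat)) : Int) := by push_cast; ring
  rw [hceil, PySem.List.pyRange_zero_nat, PySem.List.pyRange_zero_nat]
  rw [pvMatchBody s (fun i => -i - 1), pvMatchBody s (fun i => i)]
  simp only [List.foldl_map]
  rw [PySem.List.foldl_append_eq_flatMap, PySem.List.foldl_append_eq_flatMap]
  rw [List.nil_append]
  rw [pvLoop1 s (s.toList.length / 2 + s.toList.length % 2) (by omega),
      pvLoop2 s (s.toList.length / 2)]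
  rw [PySem.List.slice_from_natCast s.toList (s.toList.length / 2),
      PySem.List.slice_to_natCast s.toList (s.toList.length / 2),
      PySem.List.slice?_none_none_neg_one]
  rw [show s.toList.length - (s.toList.length / 2 + s.toList.length % 2) = s.toList.length / 2 by omega]
  rfl

-- ===== VERDICT (by name: the statement is the Claim_ definition above) =====
theorem solution2_spec : Claim_equal_solution2 := by
  intro s _
  unfold Spec_solution2
  exact solution2_eq_alt s
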